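-- pv_equiv track=rewrite | github.com/crmsnwl/reed-muller-python | reed-muller.py | text_to_vectors
-- ===== SOURCE A (Python) =====
-- M = 0
--
-- def text_to_vectors(string):
--     size = 2**M
--     vectors = []
--
--     # tekstas verčiamas į simbolių sąrašą,
--     char_list = list(string)
--
--     # į pagal ascii atitinkančių dešimtainių reikšmių sąrašą,
--     ascii_list = [ord(char) for char in char_list]
--
--     # į dvejetainių reikšmių sąrašą,
--     binary_list = [bin(ascii)[2:].zfill(7) for ascii in ascii_list]
--
--     # sąrašas verčiamas į vieno lygio sąrašą
--     binary_digits = [int(digit) for binary in binary_list for digit in binary]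
--
--     # sąrašas verčiamas į reikiamo ilgio vektorių sąraša
--     for i in range(0, len(binary_digits), M+1):
--         sublist = binary_digits[i:i+M+1]
--         # jei paskutiniam vektoriui trūksta bitų, prirašomas reikalingas kiekis nulių
--         sublist += [0] * (M+1 - len(sublist))
--
--         vectors.append(sublist)
--
--     return vectors
-- ===== SOURCE B (Python) =====
-- M = 0
--
-- def text_to_vectors(string):
--     vectors = []
--     sublist = []
--     for char in string:
--         for bit in bin(ord(char))[2:].zfill(7):
--             sublist.append(int(bit))
--             if len(sublist) == M + 1:
--                 vectors.append(sublist)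
--                 sublist = []
--     if sublist:
--         sublist += [0] * (M + 1 - len(sublist))
--         vectors.append(sublist)
--     return vectors
-- ===== Notes on version B (the rewrite author's own statement) =====
-- stated objective: simpler
-- what changed: B replaces A's four intermediate list passes (char list, ascii list, binary strings, flattened digits) plus an index/slice chunking loop by a single streaming pass over the characters that pushes bits into a running buffer and flushes it whenever it reaches M+1, padding only a non-empty final buffer; dropping the intermediate lists and per-chunk slicing gives a constant-factor speedup.
import Mathlib
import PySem

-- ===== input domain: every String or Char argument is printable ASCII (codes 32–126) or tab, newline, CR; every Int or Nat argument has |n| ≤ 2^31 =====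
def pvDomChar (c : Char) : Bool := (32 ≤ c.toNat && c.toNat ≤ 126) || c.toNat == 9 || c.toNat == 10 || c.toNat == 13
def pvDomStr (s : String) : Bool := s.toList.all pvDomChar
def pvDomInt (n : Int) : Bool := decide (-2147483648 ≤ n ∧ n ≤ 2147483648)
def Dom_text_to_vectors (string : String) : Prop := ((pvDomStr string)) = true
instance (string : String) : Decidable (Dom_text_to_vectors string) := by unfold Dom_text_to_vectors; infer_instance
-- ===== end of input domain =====

-- B folds A's four intermediate list passes and its index/slice chunking loop into one
-- streaming pass with a running bit buffer flushed at length M+1 (objective: simpler).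

-- module constant M = 0 (shared context of both Pythons)
def pvM : Int := 0

-- ===== PORT A =====
def text_to_vectors (string : String) : List (List Int) :=
  let _size : Int := 2 ^ pvM.toNat          -- size = 2**M (unused by A)
  let vectors : List (List Int) := []
  let char_list : List Char := string.toList
  let ascii_list : List Int := char_list.map (fun char => (char.toNat : Int))
  let binary_list : List (List Char) :=
    ascii_list.map (fun ascii =>
      PySem.Chars.zfill (PySem.List.slice (PySem.Int.toBinChars0b ascii) (some 2) none) 7)
  let binary_digits : List Int :=
    binary_list.flatMap (fun binary => binary.map (fun digit => (PySem.Int.ofChars? [digit]).getD 0))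
  (PySem.List.pyRange 0 (PySem.List.len binary_digits) (pvM + 1)).foldl
    (fun vectors i =>
      let sublist := PySem.List.slice binary_digits (some i) (some (i + pvM + 1))
      let sublist := sublist ++ List.replicate (pvM + 1 - (sublist.length : Int)).toNat 0
      vectors ++ [sublist]) vectors

-- ===== PORT B =====
def text_to_vectors_alt (string : String) : List (List Int) :=
  let st : List (List Int) × List Int :=
    string.toList.foldl
      (fun (st : List (List Int) × List Int) char =>
        (PySem.Chars.zfill (PySem.List.slice (PySem.Int.toBinChars0b ((char.toNat : Int))) (some 2) none) 7).foldl
          (fun (st : List (List Int) × List Int) bit =>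
            let sublist := st.2 ++ [(PySem.Int.ofChars? [bit]).getD 0]
            if (sublist.length : Int) = pvM + 1 then (st.1 ++ [sublist], [])
            else (st.1, sublist)) st)
      ([], [])
  if st.2 ≠ [] then
    st.1 ++ [st.2 ++ List.replicate (pvM + 1 - (st.2.length : Int)).toNat 0]
  else st.1

-- ===== PRECONDITION & SPEC =====
def Spec_text_to_vectors (string : String) (out : List (List Int)) : Prop := out = text_to_vectors_alt string
instance (string : String) (out : List (List Int)) : Decidable (Spec_text_to_vectors string out) := by unfold Spec_text_to_vectors; infer_instance

-- ===== CLAIM (what is proved, stated in full; the proofs are below) =====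
def Claim_equal_text_to_vectors : Prop := ∀ (string : String), Dom_text_to_vectors string → Spec_text_to_vectors string (text_to_vectors string)


-- ===== LEMMAS AND PROOFS =====

-- the char -> 7-bit-chars conversion both Pythons write as bin(ord(c))[2:].zfill(7)
def pvBits (c : Char) : List Char :=
  PySem.Chars.zfill (PySem.List.slice (PySem.Int.toBinChars0b ((c.toNat : Int))) (some 2) none) 7

-- the digit-char -> int conversion int(d)
def pvD (d : Char) : Int := (PySem.Int.ofChars? [d]).getD 0

-- B's inner loop: with M = 0 every pushed bit immediately fills and flushes the buffer
theorem pvB_inner (bs : List Char) (acc : List (List Int)) :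
    bs.foldl
      (fun (st : List (List Int) × List Int) bit =>
        let sublist := st.2 ++ [(PySem.Int.ofChars? [bit]).getD 0]
        if (sublist.length : Int) = pvM + 1 then (st.1 ++ [sublist], [])
        else (st.1, sublist)) (acc, [])
    = (acc ++ bs.map (fun b => [pvD b]), []) := by
  induction bs generalizing acc with
  | nil => simp
  | cons b bs ih =>
    rw [List.foldl_cons]
    show List.foldl _ (acc ++ [[pvD b]], ([] : List Int)) bs = _
    rw [ih]
    simp

-- B's outer loop over the characters
theorem pvB_outer (cs : List Char) (acc : List (List Int)) :
    cs.foldl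
      (fun (st : List (List Int) × List Int) char =>
        (PySem.Chars.zfill (PySem.List.slice (PySem.Int.toBinChars0b ((char.toNat : Int))) (some 2) none) 7).foldl
          (fun (st : List (List Int) × List Int) bit =>
            let sublist := st.2 ++ [(PySem.Int.ofChars? [bit]).getD 0]
            if (sublist.length : Int) = pvM + 1 then (st.1 ++ [sublist], [])
            else (st.1, sublist)) st) (acc, [])
    = (acc ++ cs.flatMap (fun c => (pvBits c).map (fun b => [pvD b])), []) := by
  induction cs generalizing acc with
  | nil => simp
  | cons c cs ih =>
    simp only [List.foldl_cons]
    rw [show (PySem.Chars.zfill (PySem.List.slice (PySem.Int.toBinChars0b ((c.toNat : Int))) (some 2) none) 7) = pvBits c from rfl]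
    rw [pvB_inner (pvBits c) acc, ih]
    simp

-- A's chunking loop over range(0, len, M+1): with M = 0 each slice is the singleton [xs[i]]
theorem pvA_loop (xs : List Int) (acc : List (List Int)) :
    (PySem.List.pyRange 0 (PySem.List.len xs) (pvM + 1)).foldl
      (fun vectors i =>
        let sublist := PySem.List.slice xs (some i) (some (i + pvM + 1))
        let sublist := sublist ++ List.replicate (pvM + 1 - (sublist.length : Int)).toNat 0
        vectors ++ [sublist]) acc
    = acc ++ xs.map (fun d => [d]) := by
  simp only [pvM]
  rw [PySem.List.foldl_append_singleton_eq_map]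
  congr 1
  rw [show ((0 : Int) + 1) = 1 from rfl, PySem.List.pyRange_one]
  apply List.ext_getElem
  · simp [PySem.List.len]
  · intro k h1 h2
    simp only [List.getElem_map, List.getElem_range]
    have hk : k < xs.length := by
      simpa [PySem.List.len] using h1
    have h0 : ((0 : Int) + (k : Int)) = ((k : Nat) : Int) := by omega
    rw [h0]
    have h1' : ((k : Nat) : Int) + 0 + 1 = ((k : Nat) : Int) + ((1 : Nat) : Int) := by push_cast; omega
    rw [h1', PySem.List.slice_natCast_add]
    have hmin : ((1 : Int) - min 1 ((xs.length - k : Nat) : Int)).toNat = 0 := by omega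
    simp [hmin]
    exact List.take_one_drop_eq_of_lt_length hk

-- ===== VERDICT (by name: the statement is the Claim_ definition above) =====
theorem text_to_vectors_spec : Claim_equal_text_to_vectors := by
  intro s _
  show text_to_vectors s = text_to_vectors_alt s
  unfold text_to_vectors text_to_vectors_alt
  rw [pvB_outer s.toList []]
  simp only []
  rw [pvA_loop]
  simp only [List.nil_append]
  rw [if_neg (by simp)]
  simp [pvD, pvBits, List.map_flatMap, List.flatMap_map, List.map_map, Function.comp]
  rfl
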